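-- pv_equiv track=rewrite | github.com/abecus/DS-and-Algorithms | pytriplets/pythagoreanTriplets.py | getReducedFactorization
-- ===== SOURCE A (Python) =====
-- from math import ceil, sqrt
--
-- def getReducedFactorization(N:int, spf:list)-> int:
--     """
--     counts repetition of each prime from prime factorisation of N
--     using trial method upon spf list, and calculating the ceil of
--     half of all prime's powers (pow(p, ceil(a/2))) and multiplying
--     them together.
--     """
--     gamma = 1
--     while (N!=1):
--         # keep a prime in prev variable
--         prev=spf[N]
--         # for counting the power
--         c=0
--         # counts power of a prime
--         while spf[N]==prev:
--             c+=1
--             N//=spf[N]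
--         # multiplies the half ceil of power on primes
--         gamma*=pow(prev, ceil(c/2))
--         prev=spf[N]
--     return gamma
-- ===== SOURCE B (Python) =====
-- def getReducedFactorization(N: int, spf: list) -> int:
--     # one flat factorization pass into a prime -> exponent table,
--     # then a separate pass multiplying p ** ceil(e/2) over its items
--     counts = {}
--     while N != 1:
--         p = spf[N]
--         counts[p] = counts.get(p, 0) + 1
--         N //= p
--     gamma = 1
--     for p, e in counts.items():
--         gamma *= p ** ((e + 1) // 2)
--     return gamma
-- ===== Notes on version B (the rewrite author's own statement) =====
-- stated objective: simpler
-- what changed: replaces A's nested outer-prime/inner-run-counting loops with one flat factorization loop that fills a prime-to-exponent dict, consumed by a separate product pass over its items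
-- outside the precondition, e.g. on getReducedFactorization(12, [0, 0, 2, 0, 0, 0, 3, 0, 0, 0, 0, 0, 2]): A returns 12, B returns 6; on getReducedFactorization(2, [9, 9, 2]): A returns 2, B returns 2
import Mathlib
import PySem

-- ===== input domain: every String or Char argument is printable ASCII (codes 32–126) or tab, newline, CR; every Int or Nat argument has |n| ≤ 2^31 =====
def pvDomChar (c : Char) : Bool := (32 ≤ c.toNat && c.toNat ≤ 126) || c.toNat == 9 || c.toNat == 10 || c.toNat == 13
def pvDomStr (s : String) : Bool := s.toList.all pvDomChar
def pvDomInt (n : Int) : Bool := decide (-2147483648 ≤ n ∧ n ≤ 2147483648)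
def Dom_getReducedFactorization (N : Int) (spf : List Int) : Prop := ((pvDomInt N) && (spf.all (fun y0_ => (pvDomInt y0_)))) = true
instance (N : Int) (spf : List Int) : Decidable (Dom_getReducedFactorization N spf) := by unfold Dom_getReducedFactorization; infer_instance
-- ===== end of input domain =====

-- B replaces A's nested run-counting loops by one flat factorization pass into a
-- prime→exponent dict plus a separate product pass over its items (objective: simpler).

-- ===== PORT A =====
-- inner `while spf[N]==prev` loop; none = IndexError / fuel exhausted (fuel only pads
-- Python's unbounded while; on Pre_ inputs it is proved never to run out)
def aInner : Nat → Int → List Int → Int → Int → Option (Int × Int)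
  | 0, _, _, _, _ => none
  | fuel+1, N, spf, prev, c =>
    match PySem.List.pyGet? spf N with
    | none => none
    | some v =>
      if v = prev then aInner fuel (PySem.Int.floordiv N v) spf prev (c + 1)
      else some (c, N)

-- outer `while N != 1` loop; `gamma *= pow(prev, ceil(c/2))` with c ≥ 1, where
-- ceil(c/2) = (c+1)//2 exactly; the dead `prev=spf[N]` after the inner loop rereads the
-- index the inner loop's exit test just read successfully, so it is omitted
def aOuter : Nat → Int → List Int → Int → Option Int
  | 0, _, _, _ => none
  | fuel+1, N, spf, gamma =>
    if N = 1 then some gamma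
    else
      match PySem.List.pyGet? spf N with
      | none => none
      | some prev =>
        match aInner (fuel+1) N spf prev 0 with
        | none => none
        | some (c, N') =>
          aOuter fuel N' spf (gamma * prev ^ ((PySem.Int.floordiv (c + 1) 2).toNat))

def getReducedFactorization (N : Int) (spf : List Int) : Int :=
  (aOuter (N.natAbs + 1) N spf 1).getD 0

-- ===== PORT B =====
-- flat `while N != 1` factorization loop filling counts[p] = counts.get(p,0)+1
def bFactor : Nat → Int → List Int → PySem.Dict Int Int → Option (PySem.Dict Int Int)
  | 0, _, _, _ => none
  | fuel+1, N, spf, counts =>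
    if N = 1 then some counts
    else
      match PySem.List.pyGet? spf N with
      | none => none
      | some p => bFactor fuel (PySem.Int.floordiv N p) spf (counts.insert p (counts.getD p 0 + 1))

-- `for p, e in counts.items(): gamma *= p ** ((e + 1) // 2)`
def getReducedFactorization_alt (N : Int) (spf : List Int) : Int :=
  match bFactor (N.natAbs + 1) N spf PySem.Dict.empty with
  | none => 0
  | some counts =>
      counts.items.foldl (fun gamma pe => gamma * pe.1 ^ ((PySem.Int.floordiv (pe.2 + 1) 2).toNat)) 1

-- ===== PRECONDITION & SPEC =====
-- Pre_ restricts to genuine smallest-prime-factor tables (each entry spf[i], 2 ≤ i < len,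
-- is the least divisor ≥ 2 of i, and spf[1] ≤ 1) with 1 ≤ N < len(spf) (or N = 1 with any
-- list): on malformed tables A's grouping of only ADJACENT repeated primes in the division
-- chain is accidental (repeated primes may be non-adjacent there), and termination and the
-- spf[1] exit test are accidental too; outside 1 ≤ N < len A raises IndexError (B too).
def Pre_getReducedFactorization (N : Int) (spf : List Int) : Prop :=
  N = 1 ∨ (2 ≤ N ∧ N < (spf.length : Int) ∧ spf.getD 1 0 ≤ 1 ∧
    ∀ i : Nat, i < spf.length → 2 ≤ i →
      (2 ≤ spf.getD i 0 ∧ spf.getD i 0 ∣ (i : Int) ∧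
        ∀ j : Nat, j < i → 2 ≤ j → (j : Int) ∣ (i : Int) → spf.getD i 0 ≤ (j : Int)))
instance (N : Int) (spf : List Int) : Decidable (Pre_getReducedFactorization N spf) := by
  unfold Pre_getReducedFactorization; infer_instance

def pvWitness_getReducedFactorization : Int × List Int :=
  (12, [0, 1, 2, 3, 2, 5, 2, 7, 2, 3, 2, 11, 2])

def Spec_getReducedFactorization (N : Int) (spf : List Int) (out : Int) : Prop :=
  out = getReducedFactorization_alt N spf
instance (N : Int) (spf : List Int) (out : Int) : Decidable (Spec_getReducedFactorization N spf out) := by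
  unfold Spec_getReducedFactorization; infer_instance

-- ===== CLAIM (what is proved, stated in full; the proofs are below) =====
def Claim_equal_getReducedFactorization : Prop :=
  ∀ (N : Int) (spf : List Int), Dom_getReducedFactorization N spf →
    Pre_getReducedFactorization N spf →
    Spec_getReducedFactorization N spf (getReducedFactorization N spf)

-- ===== LEMMAS AND PROOFS =====

-- number of times the smallest prime factor p = minFac n divides out of n in a row
def stripCnt (p : Nat) (n : Nat) : Nat :=
  if h : 2 ≤ n ∧ n.minFac = p then stripCnt p (n / n.minFac) + 1 else 0
termination_by n
decreasing_by exact Nat.div_lt_self (by omega) (Nat.minFac_prime (by omega)).one_lt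

def stripRem (p : Nat) (n : Nat) : Nat :=
  if h : 2 ≤ n ∧ n.minFac = p then stripRem p (n / n.minFac) else n
termination_by n
decreasing_by exact Nat.div_lt_self (by omega) (Nat.minFac_prime (by omega)).one_lt

lemma stripRem_le (p : Nat) : ∀ n : Nat, stripRem p n ≤ n := by
  intro n
  induction n using Nat.strong_induction_on with
  | _ n ih =>
    rw [stripRem]
    split
    · rename_i h
      exact le_trans (ih _ (Nat.div_lt_self (by omega) (Nat.minFac_prime (by omega)).one_lt))
        (Nat.div_le_self _ _)
    · exact le_refl _

lemma stripRem_pos (p : Nat) : ∀ n : Nat, 1 ≤ n → 1 ≤ stripRem p n := by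
  intro n
  induction n using Nat.strong_induction_on with
  | _ n ih =>
    intro h1
    rw [stripRem]
    split
    · rename_i h
      exact ih _ (Nat.div_lt_self (by omega) (Nat.minFac_prime (by omega)).one_lt)
        (Nat.div_pos (Nat.minFac_le (by omega)) (Nat.minFac_pos n))
    · exact h1

lemma stripRem_minFac_lt {n : Nat} (h : 2 ≤ n) : stripRem n.minFac n < n := by
  rw [stripRem, dif_pos ⟨h, rfl⟩]
  exact lt_of_le_of_lt (stripRem_le _ _)
    (Nat.div_lt_self (by omega) (Nat.minFac_prime (by omega)).one_lt)

-- A's result in closed recursive form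
def ARef (n : Nat) : Int :=
  if h : 2 ≤ n then
    (n.minFac : Int) ^ ((stripCnt n.minFac n + 1) / 2) * ARef (stripRem n.minFac n)
  else 1
termination_by n
decreasing_by exact stripRem_minFac_lt h

def pfI (n : Nat) : List Int := n.primeFactorsList.map (fun q : Nat => (q : Int))

def cntItems (l : List Int) : List (Int × Int) :=
  (PySem.Set.ofList l).map (fun k => (k, (l.count k : Int)))

def prodItems (items : List (Int × Int)) : Int :=
  (items.map (fun pe => pe.1 ^ ((PySem.Int.floordiv (pe.2 + 1) 2).toNat))).prod

lemma halfPow_cast (k : Nat) : (PySem.Int.floordiv ((k : Int) + 1) 2).toNat = (k + 1) / 2 := by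
  have h := PySem.Int.floordiv_natCast (k + 1) 2
  push_cast at h
  rw [h]
  exact Int.toNat_natCast _

lemma lookup_spf (spf : List Int) (i : Nat) (h : i < spf.length) :
    PySem.List.pyGet? spf (i : Int) = some (spf.getD i 0) := by
  simp [pysem, List.getElem?_eq_getElem h, List.getD_eq_getElem?_getD]

lemma pf_cons {n : Nat} (h : 2 ≤ n) :
    n.primeFactorsList = n.minFac :: (n / n.minFac).primeFactorsList := by
  obtain ⟨k, rfl⟩ : ∃ k, n = k + 2 := ⟨n - 2, by omega⟩
  exact Nat.primeFactorsList_add_two k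

lemma inner_spec (spf : List Int) (hV1 : spf.getD 1 0 ≤ 1)
    (hV : ∀ i : Nat, i < spf.length → 2 ≤ i → spf.getD i 0 = (Nat.minFac i : Int))
    (hlen : 1 < spf.length) :
    ∀ n : Nat, 1 ≤ n → (n = 1 ∨ n < spf.length) → ∀ p : Nat, 2 ≤ p →
      ∀ f : Nat, n ≤ f → ∀ c : Int,
      aInner f (n : Int) spf (p : Int) c
        = some (c + (stripCnt p n : Int), (stripRem p n : Int)) := by
  intro n
  induction n using Nat.strong_induction_on with
  | _ n ih =>
    intro h1 hcase p hp f hf c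
    obtain ⟨f, rfl⟩ : ∃ f', f = f' + 1 := ⟨f - 1, by omega⟩
    by_cases h2 : 2 ≤ n
    · have hlt : n < spf.length := by rcases hcase with h | h <;> omega
      have hfetch := lookup_spf spf n hlt
      rw [hV n hlt h2] at hfetch
      simp only [aInner, hfetch]
      by_cases hmf : n.minFac = p
      · subst hmf
        rw [if_pos rfl]
        have hdiv : PySem.Int.floordiv (n : Int) ((n.minFac : Nat) : Int)
            = ((n / n.minFac : Nat) : Int) := PySem.Int.floordiv_natCast n n.minFac
        rw [hdiv]
        have hlt' : n / n.minFac < n :=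
          Nat.div_lt_self (by omega) (Nat.minFac_prime (by omega)).one_lt
        have hpos' : 1 ≤ n / n.minFac :=
          Nat.div_pos (Nat.minFac_le (by omega)) (Nat.minFac_pos n)
        rw [ih _ hlt' hpos' (Or.inr (lt_trans hlt' hlt)) n.minFac hp f (by omega) (c + 1)]
        have hc : stripCnt n.minFac n = stripCnt n.minFac (n / n.minFac) + 1 := by
          rw [stripCnt, dif_pos ⟨h2, rfl⟩]
        have hr : stripRem n.minFac n = stripRem n.minFac (n / n.minFac) := by
          rw [stripRem, dif_pos ⟨h2, rfl⟩]
        rw [hc, hr]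
        have hcc : c + ((stripCnt n.minFac (n / n.minFac) + 1 : Nat) : Int)
            = c + 1 + ((stripCnt n.minFac (n / n.minFac) : Nat) : Int) := by
          push_cast; ring
        rw [hcc]
      · have hcast : ¬ ((Nat.minFac n : Int) = (p : Int)) := by
          intro hx; exact hmf (by exact_mod_cast hx)
        rw [if_neg hcast]

        have hc : stripCnt p n = 0 := by
          rw [stripCnt, dif_neg]; intro hx; exact hmf hx.2
        have hr : stripRem p n = n := by
          rw [stripRem, dif_neg]; intro hx; exact hmf hx.2
        rw [hc, hr]; simp
    · have hn : n = 1 := by omega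
      subst hn
      have hfetch := lookup_spf spf 1 hlen
      have h1c : ((1 : Nat) : Int) = (1 : Int) := by norm_num
      rw [h1c] at hfetch
      simp only [aInner, Nat.cast_one, hfetch]
      have hne : ¬ (spf.getD 1 0 = (p : Int)) := by
        intro hx
        have : (2 : Int) ≤ (p : Int) := by exact_mod_cast hp
        omega
      rw [if_neg hne]
      have hc : stripCnt p 1 = 0 := by rw [stripCnt, dif_neg]; intro hx; omega
      have hr : stripRem p 1 = 1 := by rw [stripRem, dif_neg]; intro hx; omega
      rw [hc, hr]; simp

lemma outer_spec (spf : List Int) (hV1 : spf.getD 1 0 ≤ 1)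
    (hV : ∀ i : Nat, i < spf.length → 2 ≤ i → spf.getD i 0 = (Nat.minFac i : Int))
    (hlen : 1 < spf.length) :
    ∀ n : Nat, 1 ≤ n → (n = 1 ∨ n < spf.length) → ∀ f : Nat, n ≤ f → ∀ g : Int,
      aOuter f (n : Int) spf g = some (g * ARef n) := by
  intro n
  induction n using Nat.strong_induction_on with
  | _ n ih =>
    intro h1 hcase f hf g
    obtain ⟨f, rfl⟩ : ∃ f', f = f' + 1 := ⟨f - 1, by omega⟩
    by_cases h2 : 2 ≤ n
    · have hlt : n < spf.length := by rcases hcase with h | h <;> omega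
      have hne1 : ¬ ((n : Int) = 1) := by
        intro hx; omega
      have hfetch := lookup_spf spf n hlt
      rw [hV n hlt h2] at hfetch
      have hp2 : 2 ≤ n.minFac := (Nat.minFac_prime (by omega)).two_le
      have hinner := inner_spec spf hV1 hV hlen n h1 hcase n.minFac hp2 (f + 1) hf 0
      simp only [aOuter, if_neg hne1, hfetch, hinner]
      have hm1 : 1 ≤ stripRem n.minFac n := stripRem_pos _ _ h1
      have hmlt : stripRem n.minFac n < n := stripRem_minFac_lt h2
      have hrec := ih (stripRem n.minFac n) hmlt hm1
        (Or.inr (lt_trans hmlt hlt)) f (by omega)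
        (g * (n.minFac : Int) ^ ((PySem.Int.floordiv (0 + (stripCnt n.minFac n : Int) + 1) 2).toNat))
      rw [hrec]
      have hexp : (PySem.Int.floordiv (0 + (stripCnt n.minFac n : Int) + 1) 2).toNat
          = (stripCnt n.minFac n + 1) / 2 := by
        rw [zero_add]; exact halfPow_cast _
      rw [hexp]
      have hAR : ARef n
          = (n.minFac : Int) ^ ((stripCnt n.minFac n + 1) / 2) * ARef (stripRem n.minFac n) := by
        rw [ARef, dif_pos h2]
      rw [hAR, mul_assoc]
    · have hn : n = 1 := by omega
      subst hn
      have hAR : ARef 1 = 1 := by rw [ARef, dif_neg (by omega)]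
      simp [aOuter, hAR]

lemma bfactor_spec (spf : List Int)
    (hV : ∀ i : Nat, i < spf.length → 2 ≤ i → spf.getD i 0 = (Nat.minFac i : Int)) :
    ∀ n : Nat, 1 ≤ n → (n = 1 ∨ n < spf.length) → ∀ f : Nat, n ≤ f →
      ∀ d : PySem.Dict Int Int,
      bFactor f (n : Int) spf d
        = some (n.primeFactorsList.foldl
            (fun d q => d.insert (q : Int) (d.getD (q : Int) 0 + 1)) d) := by
  intro n
  induction n using Nat.strong_induction_on with
  | _ n ih =>
    intro h1 hcase f hf d
    obtain ⟨f, rfl⟩ : ∃ f', f = f' + 1 := ⟨f - 1, by omega⟩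
    by_cases h2 : 2 ≤ n
    · have hlt : n < spf.length := by rcases hcase with h | h <;> omega
      have hne1 : ¬ ((n : Int) = 1) := by
        intro hx; omega
      have hfetch := lookup_spf spf n hlt
      rw [hV n hlt h2] at hfetch
      simp only [bFactor, if_neg hne1, hfetch]
      have hdiv : PySem.Int.floordiv (n : Int) ((n.minFac : Nat) : Int)
          = ((n / n.minFac : Nat) : Int) := PySem.Int.floordiv_natCast n n.minFac
      rw [hdiv]
      have hlt' : n / n.minFac < n :=
        Nat.div_lt_self (by omega) (Nat.minFac_prime (by omega)).one_lt
      have hpos' : 1 ≤ n / n.minFac :=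
        Nat.div_pos (Nat.minFac_le (by omega)) (Nat.minFac_pos n)
      rw [ih _ hlt' hpos' (Or.inr (lt_trans hlt' hlt)) f (by omega)]
      rw [pf_cons h2, List.foldl_cons]
    · have hn : n = 1 := by omega
      subst hn
      simp [bFactor, Nat.primeFactorsList_one]

lemma strip_spec : ∀ n : Nat, 1 ≤ n → ∀ p : Nat, 2 ≤ p →
    (∀ q : Nat, q.Prime → q ∣ n → p ≤ q) →
    n.primeFactorsList
      = List.replicate (stripCnt p n) p ++ (stripRem p n).primeFactorsList
      ∧ ¬ p ∣ stripRem p n := by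
  intro n
  induction n using Nat.strong_induction_on with
  | _ n ih =>
    intro h1 p hp2 hmin
    by_cases h2 : 2 ≤ n
    · by_cases hmf : n.minFac = p
      · subst hmf
        have hlt' : n / n.minFac < n :=
          Nat.div_lt_self (by omega) (Nat.minFac_prime (by omega)).one_lt
        have hpos' : 1 ≤ n / n.minFac :=
          Nat.div_pos (Nat.minFac_le (by omega)) (Nat.minFac_pos n)
        have hmin' : ∀ q : Nat, q.Prime → q ∣ n / n.minFac → n.minFac ≤ q := by
          intro q hq hd
          exact hmin q hq (hd.trans (Nat.div_dvd_of_dvd (Nat.minFac_dvd n)))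
        obtain ⟨hpf, hnd⟩ := ih _ hlt' hpos' n.minFac hp2 hmin'
        have hc : stripCnt n.minFac n = stripCnt n.minFac (n / n.minFac) + 1 := by
          rw [stripCnt, dif_pos ⟨h2, rfl⟩]
        have hr : stripRem n.minFac n = stripRem n.minFac (n / n.minFac) := by
          rw [stripRem, dif_pos ⟨h2, rfl⟩]
        constructor
        · rw [pf_cons h2, hc, hr, hpf]
          simp [List.replicate_succ]
        · rw [hr]; exact hnd
      · have hc : stripCnt p n = 0 := by
          rw [stripCnt, dif_neg]; intro hx; exact hmf hx.2
        have hr : stripRem p n = n := by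
          rw [stripRem, dif_neg]; intro hx; exact hmf hx.2
        constructor
        · rw [hc, hr]; simp
        · rw [hr]
          intro hdvd
          have hple : p ≤ n.minFac :=
            hmin n.minFac (Nat.minFac_prime (by omega)) (Nat.minFac_dvd n)
          have : n.minFac ≤ p := Nat.minFac_le_of_dvd hp2 hdvd
          omega
    · have hn : n = 1 := by omega
      subst hn
      have hc : stripCnt p 1 = 0 := by rw [stripCnt, dif_neg]; intro hx; omega
      have hr : stripRem p 1 = 1 := by rw [stripRem, dif_neg]; intro hx; omega
      refine ⟨by rw [hc, hr]; simp, ?_⟩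
      rw [hr]
      intro hdvd
      have := Nat.eq_one_of_dvd_one hdvd
      omega

lemma foldl_add_absorb (p : Int) (s : List Int) (hp : p ∈ s) :
    ∀ (k : Nat) (l : List Int),
      List.foldl PySem.Set.add s (List.replicate k p ++ l) = List.foldl PySem.Set.add s l := by
  intro k l
  induction k with
  | zero => simp
  | succ k ihk =>
    rw [List.replicate_succ, List.cons_append, List.foldl_cons]
    have : PySem.Set.add s p = s := by
      simp [PySem.Set.add, PySem.Set.contains, hp]
    rw [this]
    exact ihk

lemma foldl_add_shift (p : Int) :
    ∀ (r : List Int), p ∉ r → ∀ s : List Int,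
      List.foldl PySem.Set.add (p :: s) r = p :: List.foldl PySem.Set.add s r := by
  intro r
  induction r with
  | nil => intro _ s; simp
  | cons x r ihr =>
    intro hnm s
    have hxp : x ≠ p := by intro hx; exact hnm (by simp [hx])
    rw [List.foldl_cons, List.foldl_cons]
    have hstep : PySem.Set.add (p :: s) x = p :: PySem.Set.add s x := by
      simp only [PySem.Set.add, PySem.Set.contains]
      by_cases hc : x ∈ s
      · simp [hc, hxp]
      · simp [hc, hxp]
    rw [hstep]
    exact ihr (by intro h; exact hnm (by simp [h])) _

lemma ofList_decomp (p : Int) (k : Nat) (hk : 1 ≤ k) (r : List Int) (hr : p ∉ r) :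
    PySem.Set.ofList (List.replicate k p ++ r) = p :: PySem.Set.ofList r := by
  obtain ⟨k, rfl⟩ : ∃ k', k = k' + 1 := ⟨k - 1, by omega⟩
  rw [PySem.Set.ofList_eq_foldl, List.replicate_succ, List.cons_append, List.foldl_cons]
  have h0 : PySem.Set.add ([] : List Int) p = [p] := by
    simp [PySem.Set.add, PySem.Set.contains]
  rw [h0, foldl_add_absorb p [p] (by simp) k r, foldl_add_shift p r hr []]
  rw [PySem.Set.ofList_eq_foldl]

lemma cntItems_decomp (p : Int) (k : Nat) (hk : 1 ≤ k) (r : List Int) (hr : p ∉ r) :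
    cntItems (List.replicate k p ++ r) = (p, (k : Int)) :: cntItems r := by
  unfold cntItems
  rw [ofList_decomp p k hk r hr, List.map_cons]
  congr 1
  · have h0 : List.count p r = 0 := List.count_eq_zero.mpr hr
    simp [List.count_append, List.count_replicate_self, h0]
  · apply List.map_congr_left
    intro q hq
    have hqr : q ∈ r := (PySem.Set.mem_ofList r q).mp hq
    have hqp : q ≠ p := by intro hx; exact hr (hx ▸ hqr)
    have hpq : (p == q) = false := beq_eq_false_iff_ne.mpr (Ne.symm hqp)
    simp [List.count_append, List.count_replicate, hpq]

lemma prodItems_cons (p e : Int) (rest : List (Int × Int)) :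
    prodItems ((p, e) :: rest) = p ^ ((PySem.Int.floordiv (e + 1) 2).toNat) * prodItems rest := by
  simp [prodItems]

lemma mapCast_rep_app (k a : Nat) (t : List Nat) :
    (List.replicate k a ++ t).map (fun q : Nat => (q : Int))
      = List.replicate k ((a : Int)) ++ t.map (fun q : Nat => (q : Int)) := by
  rw [List.map_append, List.map_replicate]

lemma final_eq : ∀ n : Nat, 1 ≤ n → ARef n = prodItems (cntItems (pfI n)) := by
  intro n
  induction n using Nat.strong_induction_on with
  | _ n ih =>
    intro h1
    by_cases h2 : 2 ≤ n
    · have hp2 : 2 ≤ n.minFac := (Nat.minFac_prime (by omega)).two_le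
      have hmin : ∀ q : Nat, q.Prime → q ∣ n → n.minFac ≤ q := by
        intro q hq hd
        exact Nat.minFac_le_of_dvd hq.two_le hd
      obtain ⟨hpf, hnd⟩ := strip_spec n h1 n.minFac hp2 hmin
      have hm1 : 1 ≤ stripRem n.minFac n := stripRem_pos _ _ h1
      have hmlt : stripRem n.minFac n < n := stripRem_minFac_lt h2
      have hk1 : 1 ≤ stripCnt n.minFac n := by
        rw [stripCnt, dif_pos ⟨h2, rfl⟩]; omega
      have hpfI : pfI n
          = List.replicate (stripCnt n.minFac n) (n.minFac : Int)
            ++ pfI (stripRem n.minFac n) := by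
        unfold pfI
        rw [hpf]
        exact mapCast_rep_app _ _ _
      have hnm : ((n.minFac : Int)) ∉ pfI (stripRem n.minFac n) := by
        intro hmem
        rw [pfI, List.mem_map] at hmem
        obtain ⟨q, hq, hqc⟩ := hmem
        have hqe : q = n.minFac := by exact_mod_cast hqc
        subst hqe
        have hm0 : stripRem n.minFac n ≠ 0 := by omega
        have := (Nat.mem_primeFactorsList hm0).mp hq
        exact hnd this.2
      rw [hpfI, cntItems_decomp _ _ hk1 _ hnm, prodItems_cons, ← ih _ hmlt hm1]
      have hAR : ARef n
          = (n.minFac : Int) ^ ((stripCnt n.minFac n + 1) / 2) * ARef (stripRem n.minFac n) := by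
        rw [ARef, dif_pos h2]
      rw [hAR, halfPow_cast]
    · have hn : n = 1 := by omega
      subst hn
      have hAR : ARef 1 = 1 := by rw [ARef, dif_neg (by omega)]
      rw [hAR, pfI, Nat.primeFactorsList_one]
      simp [cntItems, prodItems, PySem.Set.ofList]

lemma foldl_prodItems : ∀ (items : List (Int × Int)) (a : Int),
    items.foldl (fun gamma pe => gamma * pe.1 ^ ((PySem.Int.floordiv (pe.2 + 1) 2).toNat)) a
      = a * prodItems items := by
  intro items
  induction items with
  | nil => intro a; simp [prodItems]
  | cons x items ihx =>
    intro a
    rw [List.foldl_cons, ihx]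
    simp [prodItems, mul_assoc]

lemma entry_minFac (spf : List Int) (i : Nat) (h2 : 2 ≤ i)
    (hs2 : 2 ≤ spf.getD i 0) (hdvd : spf.getD i 0 ∣ (i : Int))
    (hmin : ∀ j : Nat, j < i → 2 ≤ j → (j : Int) ∣ (i : Int) → spf.getD i 0 ≤ (j : Int)) :
    spf.getD i 0 = (Nat.minFac i : Int) := by
  set s : Int := spf.getD i 0 with hs
  have hsn : s = ((s.toNat : Nat) : Int) := (Int.toNat_of_nonneg (by omega)).symm
  have hdn : s.toNat ∣ i := by
    rw [hsn] at hdvd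
    exact_mod_cast hdvd
  have hst2 : 2 ≤ s.toNat := by omega
  have h1 : i.minFac ≤ s.toNat := Nat.minFac_le_of_dvd hst2 hdn
  have hm2 : 2 ≤ i.minFac := (Nat.minFac_prime (by omega)).two_le
  by_cases hlt : i.minFac < i
  · have := hmin i.minFac hlt hm2 (by exact_mod_cast Nat.minFac_dvd i)
    have h1' : ((i.minFac : Nat) : Int) ≤ s := by
      rw [hsn]; exact_mod_cast h1
    omega
  · have hle : i.minFac ≤ i := Nat.minFac_le (by omega)
    have heq : i.minFac = i := by omega
    have hsle : s.toNat ≤ i := Nat.le_of_dvd (by omega) hdn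
    have : s.toNat = i := by omega
    rw [hsn, this, heq]

-- ===== VERDICT (by name: the statement is the Claim_ definition above) =====
theorem getReducedFactorization_spec : Claim_equal_getReducedFactorization := by
  intro N spf _ hPre
  unfold Spec_getReducedFactorization
  rcases hPre with h1 | ⟨hN2, hNlen, hV1, hE⟩
  · subst h1
    simp [getReducedFactorization, getReducedFactorization_alt, aOuter, bFactor,
      PySem.Dict.empty]
  · have hV : ∀ i : Nat, i < spf.length → 2 ≤ i → spf.getD i 0 = (Nat.minFac i : Int) := by
      intro i hi h2i
      obtain ⟨ha, hb, hc⟩ := hE i hi h2i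
      exact entry_minFac spf i h2i ha hb hc
    set n : Nat := N.toNat with hn
    have hNn : N = (n : Int) := (Int.toNat_of_nonneg (by omega)).symm
    have hn2 : 2 ≤ n := by omega
    have hnlen : n < spf.length := by
      rw [hNn] at hNlen
      exact_mod_cast hNlen
    have hlen : 1 < spf.length := by omega
    have hcase : n = 1 ∨ n < spf.length := Or.inr hnlen
    have h1n : 1 ≤ n := by omega
    have hA : getReducedFactorization N spf = ARef n := by
      rw [hNn]
      unfold getReducedFactorization
      rw [outer_spec spf hV1 hV hlen n h1n hcase ((n : Int).natAbs + 1)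
        (by rw [Int.natAbs_natCast]; omega) 1]
      simp
    have hB : getReducedFactorization_alt N spf = prodItems (cntItems (pfI n)) := by
      rw [hNn]
      unfold getReducedFactorization_alt
      rw [bfactor_spec spf hV n h1n hcase ((n : Int).natAbs + 1)
        (by rw [Int.natAbs_natCast]; omega) PySem.Dict.empty]
      have hfold : n.primeFactorsList.foldl
          (fun d q => d.insert (q : Int) (d.getD (q : Int) 0 + 1)) PySem.Dict.empty
          = PySem.Dict.counter (pfI n) := by
        rw [← PySem.Dict.foldl_insert_getD_add_one_eq_counter, pfI]
        exact (List.foldl_map (f := fun q : Nat => (q : Int))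
          (g := fun (d : PySem.Dict Int Int) x => d.insert x (d.getD x 0 + 1))
          (l := n.primeFactorsList) (init := PySem.Dict.empty)).symm
      rw [hfold]
      show (PySem.Dict.counter (pfI n)).items.foldl
        (fun gamma pe => gamma * pe.1 ^ ((PySem.Int.floordiv (pe.2 + 1) 2).toNat)) 1
        = prodItems (cntItems (pfI n))
      rw [PySem.Dict.items_counter]
      rw [foldl_prodItems, one_mul]
      rfl
    rw [hA, hB]
    exact final_eq n h1n
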